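-- pv_equiv track=rewrite | github.com/bockor/mwhois | fusion-infoblox-and-domaindb-in-json-datastore/TBD/nra-whois-infoblox-domaindb-fusion-TEST.py | get_multi_net_spawns
-- ===== SOURCE A (Python) =====
-- from pprint import pprint
-- from collections import defaultdict
--
-- debug = False
--
-- def get_multi_net_spawns(some_domaindb_json):
--     '''
--     mns = Multi Net Spawn : A domain spawning more than 1 network
--     '''
--     mns = defaultdict(list)
--     for location,entries in some_domaindb_json.items():
--         if (entries['DNS']) : # check DNS field is not empty
--             mns[entries['DNS']].append(entries['NETWORK'])
--         else:
--             pass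
--             #mns['NODNS'].append(entries['NETWORK'])
--     '''
--     {'NODNS': [u'19.0.171.160/28'],
--      u'dns1.some.tld': [u'19.0.92.240/28'],
--      u'dns10.some.tld': [u'19.0.165.240/28'],
--      u'dns12.some.tld': [u'19.0.92.176/28', u'19.0.21.208/28'],
--      u'dns15.some.tld': [u'19.0.146.208/28', u'19.0.176.64/28'],
--      u'dns8.some.tld': [u'19.0.217.0/28']}
--     '''
--     mns = { domain:nets for domain,nets in mns.items() if len(nets) > 1}
--     if (debug):
--         pprint(dict(mns))
--     return mns
-- ===== SOURCE B (Python) =====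
-- def get_multi_net_spawns(some_domaindb_json):
--     '''
--     mns = Multi Net Spawn : A domain spawning more than 1 network
--     Two-stage distinct-key scan: first collect the distinct truthy DNS names in
--     first-occurrence order, then for each such name rescan the data gathering
--     its networks; keep only names with more than one network. No dict grouping.
--     '''
--     seen = []
--     for entries in some_domaindb_json.values():
--         dns = entries['DNS']
--         if dns and dns not in seen:
--             seen.append(dns)
--     mns = {}
--     for dns in seen:
--         nets = [e['NETWORK'] for e in some_domaindb_json.values() if e['DNS'] == dns]
--         if len(nets) > 1:
--             mns[dns] = nets
--     return mns
-- ===== Notes on version B (the rewrite author's own statement) =====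
-- stated objective: alternative
-- what changed: Instead of A's single hashed pass grouping every network into a defaultdict and then filtering groups by length, B collects the distinct truthy DNS names in first-occurrence order and then, for each name, rescans the whole input to gather its networks, keeping only names with more than one network (no dictionary grouping at all).
import Mathlib
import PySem

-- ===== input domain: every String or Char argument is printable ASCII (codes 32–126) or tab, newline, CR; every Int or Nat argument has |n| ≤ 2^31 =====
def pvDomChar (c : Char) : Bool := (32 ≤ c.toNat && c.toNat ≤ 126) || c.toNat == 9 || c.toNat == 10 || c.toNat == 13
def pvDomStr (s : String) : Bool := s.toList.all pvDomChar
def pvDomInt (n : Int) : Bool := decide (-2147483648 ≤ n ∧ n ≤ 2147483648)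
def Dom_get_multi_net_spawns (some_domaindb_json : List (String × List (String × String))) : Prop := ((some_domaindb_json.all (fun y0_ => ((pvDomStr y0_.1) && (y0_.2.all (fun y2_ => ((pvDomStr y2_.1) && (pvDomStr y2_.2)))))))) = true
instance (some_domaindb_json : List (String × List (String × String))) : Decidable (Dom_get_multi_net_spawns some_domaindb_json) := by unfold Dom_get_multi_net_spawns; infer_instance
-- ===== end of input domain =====

-- B collects the distinct truthy DNS names first and then rescans the input per name for its
-- networks (no dict grouping), instead of A's hashed defaultdict group-then-filter pass.


-- ===== PORT A =====
-- entries['DNS'] / entries['NETWORK']: Python raises KeyError on a missing key; Pre_ excludes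
-- exactly those inputs, so inside Pre_ the getD default is never used.
def pvEntryDNS (e : List (String × String)) : String := (PySem.Dict.mk e).getD "DNS" ""
def pvEntryNET (e : List (String × String)) : String := (PySem.Dict.mk e).getD "NETWORK" ""

def get_multi_net_spawns (some_domaindb_json : List (String × List (String × String))) : List (String × List String) :=
  -- mns = defaultdict(list); for location, entries in …: if entries['DNS']: mns[entries['DNS']].append(entries['NETWORK'])
  let mns : PySem.Dict String (List String) :=
    some_domaindb_json.foldl
      (fun d p => if pvEntryDNS p.2 ≠ "" then d.modify (pvEntryDNS p.2) [] (fun l => l ++ [pvEntryNET p.2]) else d)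
      PySem.Dict.empty
  -- {domain: nets for domain, nets in mns.items() if len(nets) > 1}
  mns.items.filter (fun q => 1 < q.2.length)

-- ===== PORT B =====
def get_multi_net_spawns_alt (some_domaindb_json : List (String × List (String × String))) : List (String × List String) :=
  -- seen = []; for entries in … .values(): dns = entries['DNS']; if dns and dns not in seen: seen.append(dns)
  let seen : List String :=
    some_domaindb_json.foldl
      (fun s p => if pvEntryDNS p.2 ≠ "" ∧ pvEntryDNS p.2 ∉ s then s ++ [pvEntryDNS p.2] else s) []
  -- for dns in seen: nets = [e['NETWORK'] for e in … .values() if e['DNS'] == dns]; if len(nets) > 1: mns[dns] = nets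
  seen.filterMap (fun dns =>
    let nets := (some_domaindb_json.filter (fun p => pvEntryDNS p.2 == dns)).map (fun p => pvEntryNET p.2)
    if 1 < nets.length then some (dns, nets) else none)

-- ===== PRECONDITION & SPEC =====
-- Pre_ excludes exactly the inputs where Python A raises KeyError: an entries dict with no
-- 'DNS' key, or one with a truthy 'DNS' but no 'NETWORK' key.
def Pre_get_multi_net_spawns (some_domaindb_json : List (String × List (String × String))) : Prop :=
  (some_domaindb_json.all (fun p =>
    ((PySem.Dict.mk p.2).get? "DNS").isSome &&
    (decide ((PySem.Dict.mk p.2).getD "DNS" "" = "") || ((PySem.Dict.mk p.2).get? "NETWORK").isSome))) = true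
instance (some_domaindb_json : List (String × List (String × String))) : Decidable (Pre_get_multi_net_spawns some_domaindb_json) := by unfold Pre_get_multi_net_spawns; infer_instance

def pvWitness_get_multi_net_spawns : (List (String × List (String × String))) :=
  [("loc1", [("DNS", "dns12.some.tld"), ("NETWORK", "19.0.92.176/28")]),
   ("loc2", [("DNS", "dns12.some.tld"), ("NETWORK", "19.0.21.208/28")]),
   ("loc3", [("DNS", ""), ("NETWORK", "19.0.171.160/28")]),
   ("loc4", [("DNS", "dns1.some.tld"), ("NETWORK", "19.0.92.240/28")])]

def Spec_get_multi_net_spawns (some_domaindb_json : List (String × List (String × String))) (out : List (String × List String)) : Prop := out = get_multi_net_spawns_alt some_domaindb_json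
instance (some_domaindb_json : List (String × List (String × String))) (out : List (String × List String)) : Decidable (Spec_get_multi_net_spawns some_domaindb_json out) := by unfold Spec_get_multi_net_spawns; infer_instance

-- ===== CLAIM (what is proved, stated in full; the proofs are below) =====
def Claim_equal_get_multi_net_spawns : Prop := ∀ (some_domaindb_json : List (String × List (String × String))), Dom_get_multi_net_spawns some_domaindb_json → Pre_get_multi_net_spawns some_domaindb_json → Spec_get_multi_net_spawns some_domaindb_json (get_multi_net_spawns some_domaindb_json)

-- ===== LEMMAS AND PROOFS =====

-- filterMap of an if-some/none generator (Prop test) is filter-then-map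
theorem pv_filterMap_ite {α β : Type} (P : α → Prop) [DecidablePred P] (f : α → β) (l : List α) :
    l.filterMap (fun x => if P x then some (f x) else none)
      = (l.filter (fun x => decide (P x))).map f := by
  induction l with
  | nil => rfl
  | cons x t ih => by_cases h : P x <;> simp [h, ih]

-- B's first loop is Set.ofList of the truthy DNS names, in order
theorem pv_seen_eq (l : List (String × List (String × String))) (s : PySem.Set String) :
    l.foldl (fun s p => if pvEntryDNS p.2 ≠ "" ∧ pvEntryDNS p.2 ∉ s then s ++ [pvEntryDNS p.2] else s) s
      = ((l.filter (fun x => decide (pvEntryDNS x.2 ≠ ""))).map (fun p => pvEntryDNS p.2)).foldl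
          PySem.Set.add s := by
  induction l generalizing s with
  | nil => rfl
  | cons x t ih =>
    by_cases h : pvEntryDNS x.2 = ""
    · simp [h, ih]
    · simp only [List.foldl_cons, List.filter_cons, h, not_false_iff, decide_true,
        ne_eq, if_true, List.map_cons]
      rw [ih]
      congr 1
      by_cases hm : pvEntryDNS x.2 ∈ s
      · simp [PySem.Set.add, PySem.Set.contains, hm]
      · simp [PySem.Set.add, PySem.Set.contains, hm]

-- the grouping fold of port A, characterised: keys in first-occurrence order,
-- each key paired with its networks in input order
theorem pv_group_items (l : List (String × List (String × String))) :
    (l.foldl (fun d p => d.modify (pvEntryDNS p.2) [] (fun v => v ++ [pvEntryNET p.2]))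
        PySem.Dict.empty).items
      = (PySem.Set.ofList (l.map (fun p => pvEntryDNS p.2))).map
          (fun k => (k, (l.filter (fun p => pvEntryDNS p.2 == k)).map (fun p => pvEntryNET p.2))) := by
  have hnd : (l.foldl (fun d p => d.modify (pvEntryDNS p.2) [] (fun v => v ++ [pvEntryNET p.2]))
      PySem.Dict.empty).keys.Nodup := by
    exact PySem.Dict.nodup_keys_foldl_modify_key l (fun p => pvEntryDNS p.2) []
      (fun d p => fun v => v ++ [pvEntryNET p.2]) PySem.Dict.empty (by simp)
  rw [PySem.Dict.items_eq_map_keys _ hnd ([] : List String),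
      PySem.Dict.keys_foldl_modify_key, PySem.Dict.keys_empty, PySem.Set.update_nil_left]
  apply List.map_congr_left
  intro k _
  have hpair : (l.foldl (fun d p => d.modify (pvEntryDNS p.2) [] (fun v => v ++ [pvEntryNET p.2]))
      PySem.Dict.empty)
      = ((l.map (fun p => (pvEntryDNS p.2, pvEntryNET p.2))).foldl
          (fun d q => d.modify q.1 [] (fun v => v ++ [q.2])) PySem.Dict.empty) := by
    rw [List.foldl_map]
  rw [hpair, PySem.Dict.getD_foldl_modify_append, PySem.Dict.getD_empty, List.nil_append,
      List.filter_map, List.map_map]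
  rfl

theorem pv_main (j : List (String × List (String × String))) :
    get_multi_net_spawns j = get_multi_net_spawns_alt j := by
  simp only [get_multi_net_spawns, get_multi_net_spawns_alt]
  rw [PySem.List.foldl_ite_eq_foldl_filter, pv_seen_eq, pv_group_items]
  set t := j.filter (fun x => decide (pvEntryDNS x.2 ≠ "")) with ht
  set K := t.map (fun p => pvEntryDNS p.2) with hK
  rw [← PySem.Set.ofList_eq_foldl]
  -- every member of K is nonempty, so filtering j on (dns == k) equals filtering t on it
  have hKmem : ∀ k ∈ PySem.Set.ofList K, k ≠ "" := by
    intro k hk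
    have : k ∈ K := (PySem.Set.mem_ofList K k).mp hk
    rcases List.mem_map.mp this with ⟨p, hp, rfl⟩
    have := (List.mem_filter.mp (ht ▸ hp)).2
    simpa using this
  have hjt : ∀ k, k ≠ "" →
      j.filter (fun p => pvEntryDNS p.2 == k) = t.filter (fun p => pvEntryDNS p.2 == k) := by
    intro k hk
    rw [ht, List.filter_filter]
    apply List.filter_congr
    intro p _
    by_cases h : pvEntryDNS p.2 = k
    · simp [h, hk]
    · simp [h]
  rw [pv_filterMap_ite (fun dns : String =>
        1 < ((j.filter (fun p => pvEntryDNS p.2 == dns)).map (fun p => pvEntryNET p.2)).length)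
      (fun dns => (dns, (j.filter (fun p => pvEntryDNS p.2 == dns)).map (fun p => pvEntryNET p.2)))]
  rw [List.filter_map]
  have hfe : List.filter ((fun q => decide (1 < q.2.length)) ∘
        (fun k => (k, (t.filter (fun p => pvEntryDNS p.2 == k)).map (fun p => pvEntryNET p.2))))
        (PySem.Set.ofList K)
      = List.filter (fun dns => decide
          (1 < ((j.filter (fun p => pvEntryDNS p.2 == dns)).map (fun p => pvEntryNET p.2)).length))
        (PySem.Set.ofList K) := by
    apply List.filter_congr
    intro k hk
    rw [hjt k (hKmem k hk)]
    rfl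
  rw [hfe]
  apply List.map_congr_left
  intro k hk
  have hkS : k ∈ PySem.Set.ofList K := (List.mem_filter.mp hk).1
  rw [hjt k (hKmem k hkS)]

-- ===== VERDICT (by name: the statement is the Claim_ definition above) =====
theorem get_multi_net_spawns_spec : Claim_equal_get_multi_net_spawns := by
  intro j _ _
  exact pv_main j
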